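-- pv_equiv track=rewrite | github.com/DmitryChitalov/algorithms_2022 | Урок 7. Практическое задание/Task_7_2_2.py | median_equal_sides
-- ===== SOURCE A (Python) =====
-- def median_equal_sides(my_lilst_1):
--     border = len(my_lilst_1) // 2
--     left_side = []
--     right_side = []
--     mid = []
--
--     for item in my_lilst_1:
--         for element in my_lilst_1:
--             if element > item:
--                 right_side.append(element)
--             elif element < item:
--                 left_side.append(element)
--             else:
--                 mid.append(element)
--
--         if mid:
--             mid.remove(item)
--
--         for el in mid:
--             left_side.append(el) if len(left_side) < border else right_side.append(el)
--
--         if len(left_side) == len(right_side):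
--             return item
--
--         left_side.clear()
--         right_side.clear()
--         mid.clear()
-- ===== SOURCE B (Python) =====
-- def median_equal_sides(my_lilst_1):
--     n = len(my_lilst_1)
--     border = n // 2
--     cnt = {}
--     for x in my_lilst_1:
--         cnt[x] = cnt.get(x, 0) + 1
--     less = {}
--     acc = 0
--     for v in sorted(cnt):
--         less[v] = acc
--         acc += cnt[v]
--     for x in my_lilst_1:
--         lt = less[x]
--         eq = cnt[x] - 1
--         gt = n - lt - eq - 1
--         to_left = min(eq, max(0, border - lt))
--         if lt + to_left == gt + eq - to_left:
--             return x
--     return None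
-- ===== Notes on version B (the rewrite author's own statement) =====
-- stated objective: alternative
-- what changed: Instead of rebuilding left/right/mid lists element-by-element for every candidate (A's nested passes), B makes one counting pass into a dict, sorts the distinct values once to get prefix sums of 'elements smaller than v', and decides each candidate's balance with a closed-form arithmetic check in a single scan of the original order.
import Mathlib
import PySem

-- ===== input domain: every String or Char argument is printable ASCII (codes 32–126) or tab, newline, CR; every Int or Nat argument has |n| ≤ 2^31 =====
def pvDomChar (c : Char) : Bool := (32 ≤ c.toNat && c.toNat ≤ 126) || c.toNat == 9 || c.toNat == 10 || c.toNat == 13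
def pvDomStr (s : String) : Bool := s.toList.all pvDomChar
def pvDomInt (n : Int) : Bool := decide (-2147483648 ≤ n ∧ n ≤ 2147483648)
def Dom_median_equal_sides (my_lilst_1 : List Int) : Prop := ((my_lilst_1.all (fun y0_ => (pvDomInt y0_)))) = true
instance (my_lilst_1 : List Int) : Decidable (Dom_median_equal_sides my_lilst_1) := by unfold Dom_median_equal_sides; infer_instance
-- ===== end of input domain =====

-- B replaces A's per-item rebuild of left/right/mid lists by one counting pass +
-- sorted prefix sums, deciding each balance arithmetically (objective: alternative).

-- ===== PORT A =====
-- inner 'for element in my_lilst_1' loop building (left_side, right_side, mid)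
def pvA_partition (l : List Int) (item : Int) : List Int × List Int × List Int :=
  l.foldl (fun (s : List Int × List Int × List Int) element =>
    if element > item then (s.1, s.2.1 ++ [element], s.2.2)
    else if element < item then (s.1 ++ [element], s.2.1, s.2.2)
    else (s.1, s.2.1, s.2.2 ++ [element])) ([], [], [])

-- 'for el in mid: left.append(el) if len(left) < border else right.append(el)'
def pvA_distribute (border : Int) (mid : List Int) (L R : List Int) : List Int × List Int :=
  mid.foldl (fun (s : List Int × List Int) el =>
    if (s.1.length : Int) < border then (s.1 ++ [el], s.2) else (s.1, s.2 ++ [el])) (L, R)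

-- the outer 'for item in my_lilst_1' loop with its early return
def pvA_scan (l : List Int) (border : Int) : List Int → Option Int
  | [] => none
  | item :: rest =>
    let p := pvA_partition l item
    -- 'if mid: mid.remove(item)'; the remove never raises: when mid ≠ [] it consists of
    -- copies of item (item itself is in it), so the 'none' fallback below is unreachable
    let mid' := if p.2.2 ≠ [] then
                  (match PySem.List.remove? p.2.2 item with
                   | some m => m
                   | none => p.2.2)
                else p.2.2
    let d := pvA_distribute border mid' p.1 p.2.1
    if d.1.length = d.2.length then some item else pvA_scan l border rest

def median_equal_sides (my_lilst_1 : List Int) : Option Int :=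
  pvA_scan my_lilst_1 (PySem.Int.floordiv (my_lilst_1.length : Int) 2) my_lilst_1

-- ===== PORT B =====
-- the final 'for x in my_lilst_1' loop with its early return; the dict lookups less[x]
-- and cnt[x] never raise (every scanned x is a key), so the '.getD 0' is unreachable
def pvB_scan (cnt less : PySem.Dict Int Int) (n border : Int) : List Int → Option Int
  | [] => none
  | x :: rest =>
    let lt := (less.get? x).getD 0
    let eq := (cnt.get? x).getD 0 - 1
    let gt := n - lt - eq - 1
    let toLeft := min eq (max 0 (border - lt))
    if lt + toLeft = gt + eq - toLeft then some x else pvB_scan cnt less n border rest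

def median_equal_sides_alt (my_lilst_1 : List Int) : Option Int :=
  let n : Int := my_lilst_1.length
  let border := PySem.Int.floordiv n 2
  let cnt := my_lilst_1.foldl (fun d x => d.insert x (d.getD x 0 + 1)) PySem.Dict.empty
  let less := (PySem.List.sorted cnt.keys (fun v => v) false).foldl
      (fun (s : PySem.Dict Int Int × Int) v =>
        (s.1.insert v s.2, s.2 + (cnt.get? v).getD 0)) (PySem.Dict.empty, 0)
  pvB_scan cnt less.1 n border my_lilst_1

-- ===== PRECONDITION & SPEC =====
def Spec_median_equal_sides (my_lilst_1 : List Int) (out : Option Int) : Prop := out = median_equal_sides_alt my_lilst_1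
instance (my_lilst_1 : List Int) (out : Option Int) : Decidable (Spec_median_equal_sides my_lilst_1 out) := by unfold Spec_median_equal_sides; infer_instance

-- ===== CLAIM (what is proved, stated in full; the proofs are below) =====
def Claim_equal_median_equal_sides : Prop := ∀ (my_lilst_1 : List Int), Dom_median_equal_sides my_lilst_1 → Spec_median_equal_sides my_lilst_1 (median_equal_sides my_lilst_1)

-- ===== LEMMAS AND PROOFS =====
theorem pv_partition_aux (x : Int) (l : List Int) : ∀ (L R M : List Int),
    l.foldl (fun (s : List Int × List Int × List Int) element =>
      if element > x then (s.1, s.2.1 ++ [element], s.2.2)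
      else if element < x then (s.1 ++ [element], s.2.1, s.2.2)
      else (s.1, s.2.1, s.2.2 ++ [element])) (L, R, M)
    = (L ++ l.filter (fun y => decide (y < x)),
       R ++ l.filter (fun y => decide (x < y)),
       M ++ l.filter (fun y => !decide (x < y) && !decide (y < x))) := by
  induction l with
  | nil => simp
  | cons a t ih =>
    intro L R M
    simp only [List.foldl_cons, List.filter_cons]
    rcases lt_trichotomy a x with h|h|h
    · simp [h, not_lt.2 h.le, ih]
    · simp [h, ih]
    · simp [h, not_lt.2 h.le, ih]

theorem pv_partition_eq (l : List Int) (x : Int) :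
    pvA_partition l x = (l.filter (fun y => decide (y < x)),
                         l.filter (fun y => decide (x < y)),
                         l.filter (fun y => !decide (x < y) && !decide (y < x))) := by
  simpa [pvA_partition] using pv_partition_aux x l [] [] []

theorem pv_mid_count (l : List Int) (x : Int) :
    (l.filter (fun y => !decide (x < y) && !decide (y < x))).length = l.count x := by
  rw [List.count_eq_countP, List.countP_eq_length_filter]
  congr 1; apply List.filter_congr; intro a _
  rcases lt_trichotomy a x with h|h|h
  · simp [h, h.ne, not_lt.2 h.le]
  · simp [h]
  · simp [h, h.ne', not_lt.2 h.le]

theorem pv_dist_len (border : Int) : ∀ (m L R : List Int),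
    ((pvA_distribute border m L R).1.length : Int)
      = L.length + min (m.length : Int) (max 0 (border - L.length)) ∧
    ((pvA_distribute border m L R).2.length : Int)
      = R.length + ((m.length : Int) - min (m.length : Int) (max 0 (border - L.length))) := by
  intro m
  induction m with
  | nil => intro L R; simp [pvA_distribute]
  | cons el t ih =>
    intro L R
    simp only [pvA_distribute, List.foldl_cons] at *
    by_cases h : (L.length : Int) < border
    · have := ih (L ++ [el]) R
      simp only [h, if_true] at this ⊢
      simp only [List.length_append, List.length_cons, List.length_nil] at this ⊢
      constructor
      · rw [this.1]; push_cast; omega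
      · rw [this.2]; push_cast; omega
    · have := ih L (R ++ [el])
      simp only [h, if_false] at this ⊢
      simp only [List.length_append, List.length_cons, List.length_nil] at this ⊢
      constructor
      · rw [this.1]; push_cast; omega
      · rw [this.2]; push_cast; omega

theorem pv_count_split (l : List Int) (x : Int) :
    l.countP (fun y => decide (y < x)) + l.countP (fun y => decide (x < y)) + l.count x = l.length := by
  induction l with
  | nil => simp
  | cons a t ih =>
    simp only [List.countP_cons, List.count_cons, List.length_cons]
    rcases lt_trichotomy a x with h|h|h
    · simp [h, h.ne, not_lt.2 h.le]; omega
    · simp [h]; omega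
    · simp [h, h.ne', not_lt.2 h.le]; omega

theorem pv_lessfold_untouched (g : Int → Int) (v : Int) :
    ∀ (us : List Int) (d : PySem.Dict Int Int) (acc : Int), (∀ u ∈ us, u ≠ v) →
    (us.foldl (fun (s : PySem.Dict Int Int × Int) u => (s.1.insert u s.2, s.2 + g u)) (d, acc)).1.get? v
      = d.get? v := by
  intro us
  induction us with
  | nil => intro d acc _; rfl
  | cons u t ih =>
    intro d acc h
    simp only [List.foldl_cons]
    rw [ih _ _ (fun w hw => h w (List.mem_cons_of_mem _ hw))]
    exact PySem.Dict.get?_insert_of_ne _ _ (h u List.mem_cons_self).symm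

theorem pv_lessfold_get? (g : Int → Int) (v : Int) :
    ∀ (us : List Int) (d : PySem.Dict Int Int) (acc : Int),
    us.Pairwise (· < ·) → v ∈ us →
    (us.foldl (fun (s : PySem.Dict Int Int × Int) u => (s.1.insert u s.2, s.2 + g u)) (d, acc)).1.get? v
      = some (acc + ((us.filter (fun u => decide (u < v))).map g).sum) := by
  intro us
  induction us with
  | nil => intro d acc _ hv; simp at hv
  | cons u t ih =>
    intro d acc hp hv
    simp only [List.foldl_cons, List.filter_cons]
    rcases List.mem_cons.1 hv with rfl | hvt
    · have hne : ∀ w ∈ t, w ≠ v := fun w hw => (List.rel_of_pairwise_cons hp hw).ne'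
      rw [pv_lessfold_untouched g v t _ _ hne]
      have : t.filter (fun u => decide (u < v)) = [] := by
        apply List.filter_eq_nil_iff.2
        intro w hw
        simp [not_lt.2 (List.rel_of_pairwise_cons hp hw).le]
      simp [this, PySem.Dict.get?_insert_self]
    · have huv : u < v := List.rel_of_pairwise_cons hp hvt
      rw [ih _ _ (List.pairwise_cons.1 hp).2 hvt]
      simp [huv]
      ring_nf

theorem pv_sum_indicator (y : Int) : ∀ (s : List Int), s.Nodup →
    (s.map (fun u => if u = y then (1:Int) else 0)).sum = if y ∈ s then 1 else 0 := by
  intro s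
  induction s with
  | nil => simp
  | cons a t ih =>
    intro h
    simp only [List.map_cons, List.sum_cons, List.nodup_cons] at *
    rcases eq_or_ne a y with rfl | hne
    · simp [ih h.2, h.1]
    · simp [hne, Ne.symm hne, ih h.2]

theorem pv_sum_map_add (f g : Int → Int) : ∀ (s : List Int),
    (s.map (fun u => f u + g u)).sum = (s.map f).sum + (s.map g).sum := by
  intro s
  induction s with
  | nil => simp
  | cons a t ih => simp [ih]; ring

theorem pv_sum_filter_count (x : Int) : ∀ (l us : List Int), us.Nodup → (∀ y ∈ l, y ∈ us) →
    ((us.filter (fun u => decide (u < x))).map (fun u => (l.count u : Int))).sum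
      = (l.countP (fun y => decide (y < x)) : Int) := by
  intro l
  induction l with
  | nil => intro us _ _; simp
  | cons y t ih =>
    intro us hnd hcov
    have hmapeq : (us.filter (fun u => decide (u < x))).map (fun u => ((y :: t).count u : Int))
        = (us.filter (fun u => decide (u < x))).map
            (fun u => (t.count u : Int) + (if u = y then (1:Int) else 0)) := by
      apply List.map_congr_left
      intro u _
      rw [List.count_cons]
      by_cases h : u = y <;> simp [h]; omega
    rw [hmapeq, pv_sum_map_add,
        ih us hnd (fun z hz => hcov z (List.mem_cons_of_mem _ hz)),
        pv_sum_indicator y _ (hnd.filter _)]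
    have hy : y ∈ us := hcov y List.mem_cons_self
    rw [List.countP_cons]
    by_cases hlt : y < x
    · have : y ∈ us.filter (fun u => decide (u < x)) := List.mem_filter.2 ⟨hy, by simp [hlt]⟩
      simp [this, hlt]
    · have : y ∉ us.filter (fun u => decide (u < x)) := by
        intro hmem
        exact hlt (by simpa using (List.mem_filter.1 hmem).2)
      simp [this, hlt]

theorem pv_cnt_lookup (l : List Int) (x : Int) :
    (((l.foldl (fun d x => d.insert x (d.getD x 0 + 1)) PySem.Dict.empty).get? x).getD 0)
      = (l.count x : Int) := by
  rw [PySem.Dict.foldl_insert_getD_add_one_eq_counter, ← PySem.Dict.getD_eq_get?_getD,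
      PySem.Dict.getD_counter]

theorem pv_less_lookup (l : List Int) (x : Int) (hx : x ∈ l) :
    ((PySem.List.sorted ((l.foldl (fun d x => d.insert x (d.getD x 0 + 1)) PySem.Dict.empty : PySem.Dict Int Int)).keys (fun v => v) false).foldl
        (fun (s : PySem.Dict Int Int × Int) v =>
          (s.1.insert v s.2, s.2 + ((l.foldl (fun d x => d.insert x (d.getD x 0 + 1)) PySem.Dict.empty).get? v).getD 0))
        (PySem.Dict.empty, 0)).1.get? x
      = some ((l.countP (fun y => decide (y < x)) : Int)) := by
  simp only [PySem.Dict.foldl_insert_getD_add_one_eq_counter, PySem.Dict.keys_counter]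
  have hp : (PySem.List.sorted (PySem.Set.ofList l) (fun v => v) false).Pairwise (· < ·) :=
    PySem.List.sorted_ofList_pairwise_lt l
  have hmem : x ∈ PySem.List.sorted (PySem.Set.ofList l) (fun v => v) false :=
    (PySem.List.mem_sorted _ _ _ _).2 ((PySem.Set.mem_ofList _ _).2 hx)
  rw [pv_lessfold_get? _ x _ _ _ hp hmem]
  have hg : ((PySem.List.sorted (PySem.Set.ofList l) (fun v => v) false).filter
        (fun u => decide (u < x))).map (fun v => ((PySem.Dict.counter l).get? v).getD 0)
      = ((PySem.List.sorted (PySem.Set.ofList l) (fun v => v) false).filter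
        (fun u => decide (u < x))).map (fun u => (l.count u : Int)) := by
    apply List.map_congr_left
    intro u _
    rw [← PySem.Dict.getD_eq_get?_getD, PySem.Dict.getD_counter]
  rw [hg, pv_sum_filter_count x l _
        ((PySem.List.sorted_perm _ _ _).symm.nodup (PySem.Set.nodup_ofList l))
        (fun y hy => (PySem.List.mem_sorted _ _ _ _).2 ((PySem.Set.mem_ofList _ _).2 hy))]
  norm_num

theorem pv_scan_eq (l : List Int) (border : Int) (cnt less : PySem.Dict Int Int)
    (h1 : ∀ x ∈ l, (cnt.get? x).getD 0 = (l.count x : Int))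
    (h2 : ∀ x ∈ l, (less.get? x).getD 0 = (l.countP (fun y => decide (y < x)) : Int)) :
    ∀ rest, (∀ x ∈ rest, x ∈ l) →
      pvA_scan l border rest = pvB_scan cnt less (l.length : Int) border rest := by
  intro rest
  induction rest with
  | nil => intro _; rfl
  | cons x t ih =>
    intro hsub
    have hx : x ∈ l := hsub x List.mem_cons_self
    have hxmid : x ∈ l.filter (fun y => !decide (x < y) && !decide (y < x)) :=
      List.mem_filter.2 ⟨hx, by simp⟩
    simp only [pvA_scan, pvB_scan, pv_partition_eq, h1 x hx, h2 x hx]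
    rw [if_pos (List.ne_nil_of_mem hxmid),
        PySem.List.remove?_eq_some_erase _ x hxmid]
    have hd := pv_dist_len border ((l.filter (fun y => !decide (x < y) && !decide (y < x))).erase x)
        (l.filter (fun y => decide (y < x))) (l.filter (fun y => decide (x < y)))
    have hlen : ((l.filter (fun y => !decide (x < y) && !decide (y < x))).erase x).length
        = l.count x - 1 := by
      rw [List.length_erase_of_mem hxmid, pv_mid_count]
    have hc1 : 1 ≤ l.count x := List.count_pos_iff.2 hx
    have habc := pv_count_split l x
    have hL : (l.filter (fun y => decide (y < x))).length = l.countP (fun y => decide (y < x)) :=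
      (List.countP_eq_length_filter).symm
    have hR : (l.filter (fun y => decide (x < y))).length = l.countP (fun y => decide (x < y)) :=
      (List.countP_eq_length_filter).symm
    rw [hlen, hL, hR] at hd
    have hiff :
        ((pvA_distribute border ((l.filter (fun y => !decide (x < y) && !decide (y < x))).erase x)
            (l.filter (fun y => decide (y < x))) (l.filter (fun y => decide (x < y)))).1.length
          = (pvA_distribute border ((l.filter (fun y => !decide (x < y) && !decide (y < x))).erase x)
            (l.filter (fun y => decide (y < x))) (l.filter (fun y => decide (x < y)))).2.length)
        ↔ ((l.countP (fun y => decide (y < x)) : Int) +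
              min ((l.count x : Int) - 1) (max 0 (border - (l.countP (fun y => decide (y < x)) : Int)))
            = ((l.length : Int) - (l.countP (fun y => decide (y < x)) : Int) - ((l.count x : Int) - 1) - 1)
              + ((l.count x : Int) - 1)
              - min ((l.count x : Int) - 1) (max 0 (border - (l.countP (fun y => decide (y < x)) : Int)))) := by
      rw [← Int.natCast_inj, hd.1, hd.2]
      constructor <;> intro h <;> push_cast at * <;> omega
    exact if_congr hiff rfl (ih (fun z hz => hsub z (List.mem_cons_of_mem _ hz)))

-- ===== VERDICT (by name: the statement is the Claim_ definition above) =====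
theorem median_equal_sides_spec : Claim_equal_median_equal_sides := by
  intro l _
  unfold Spec_median_equal_sides median_equal_sides median_equal_sides_alt
  exact (pv_scan_eq l (PySem.Int.floordiv (l.length : Int) 2) _ _
    (fun x _ => pv_cnt_lookup l x)
    (fun x hx => by rw [pv_less_lookup l x hx]; rfl)
    l (fun _ h => h)).symm ▸ rfl
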